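-- pv_equiv track=rewrite | github.com/cutehammond772/problem-solving-archive | 백준/Platinum/11694. 님 게임/님 게임.py | solve
-- ===== SOURCE A (Python) =====
-- def solve(N, P):
-- 	result = 0
-- 	ones_only = True
--
-- 	for i in range(N):
-- 		Pi = P[i]
--
-- 		if Pi > 1:
-- 			ones_only = False
--
-- 		result ^= Pi
--
-- 	# Case 1. 돌더미 당 각각 한 개씩만 있는 경우,
-- 	# 돌더미의 수가 홀수이면 선공이 질 수밖에 없다.
-- 	check_01 = ones_only and result
--
-- 	# Case 2. 위의 케이스가 아닌 경우, 선공은 어떻게든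
-- 	# 위의 상태로 만들 수 있다.
-- 	check_02 = not ones_only and not result
--
-- 	return "cubelover" if (check_01 or check_02) else "koosaga"
-- ===== SOURCE B (Python) =====
-- def solve(N, P):
--     # Histogram of pile sizes: equal piles cancel pairwise in the nim-sum,
--     # so XOR only over sizes occurring an odd number of times.
--     counts = {}
--     for i in range(N):
--         v = P[i]
--         counts[v] = counts.get(v, 0) + 1
--     x = 0
--     for v, c in counts.items():
--         if c & 1:
--             x ^= v
--     big = any(v > 1 for v in counts)
--     return "cubelover" if big == (x == 0) else "koosaga"
-- ===== Notes on version B (the rewrite author's own statement) =====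
-- stated objective: alternative
-- what changed: Replaces A's fused xor/flag loop by a histogram algorithm: build a dict counting occurrences of each pile size (equal piles cancel pairwise), XOR only the sizes of odd multiplicity, read the >1 flag off the distinct keys, and collapse the two-case rule to big == (x == 0).
import Mathlib
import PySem

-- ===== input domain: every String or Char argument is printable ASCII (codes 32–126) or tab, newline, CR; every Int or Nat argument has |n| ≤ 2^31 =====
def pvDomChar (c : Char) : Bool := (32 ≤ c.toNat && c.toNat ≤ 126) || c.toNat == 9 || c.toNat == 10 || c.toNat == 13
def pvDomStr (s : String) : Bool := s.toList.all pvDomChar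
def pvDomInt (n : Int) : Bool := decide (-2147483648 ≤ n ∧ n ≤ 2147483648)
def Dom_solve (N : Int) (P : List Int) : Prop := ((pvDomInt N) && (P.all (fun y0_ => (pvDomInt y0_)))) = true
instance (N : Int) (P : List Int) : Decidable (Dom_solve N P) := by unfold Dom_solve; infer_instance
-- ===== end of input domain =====

-- B replaces A's fused xor/flag loop by a histogram algorithm: count occurrences of each
-- pile size in a dict (equal piles cancel pairwise in the nim-sum), XOR only the sizes of
-- odd multiplicity, read the >1 flag off the distinct keys; objective: alternative.

-- ===== PORT A =====
def solve (N : Int) (P : List Int) : String :=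
  let st := (PySem.List.pyRange 0 N 1).foldl
    (fun (st : Int × Bool) i =>
      let Pi := (PySem.List.pyGet? P i).getD 0
      (PySem.Int.bxor st.1 Pi, if 1 < Pi then false else st.2))
    (0, true)
  let check01 := st.2 && (st.1 != 0)
  let check02 := !st.2 && (st.1 == 0)
  if check01 || check02 then "cubelover" else "koosaga"

-- ===== PORT B =====
def solve_alt (N : Int) (P : List Int) : String :=
  let counts := (PySem.List.pyRange 0 N 1).foldl
    (fun (d : PySem.Dict Int Int) i =>
      let v := (PySem.List.pyGet? P i).getD 0
      d.insert v (d.getD v 0 + 1)) PySem.Dict.empty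
  let x := counts.items.foldl
    (fun (a : Int) vc => if PySem.Int.band vc.2 1 ≠ 0 then PySem.Int.bxor a vc.1 else a) 0
  let big := counts.keys.any (fun v => decide (1 < v))
  if big == (x == 0) then "cubelover" else "koosaga"

-- ===== PRECONDITION & SPEC =====
-- Pre_ excludes exactly N > len(P), where A's (and B's) P[i] raises IndexError.
def Pre_solve (N : Int) (P : List Int) : Prop := N ≤ (P.length : Int)
instance (N : Int) (P : List Int) : Decidable (Pre_solve N P) := by unfold Pre_solve; infer_instance
def pvWitness_solve : Int × List Int := (2, [1, 2, 3])
def Spec_solve (N : Int) (P : List Int) (out : String) : Prop := out = solve_alt N P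
instance (N : Int) (P : List Int) (out : String) : Decidable (Spec_solve N P out) := by unfold Spec_solve; infer_instance

-- ===== CLAIM (what is proved, stated in full; the proofs are below) =====
def Claim_equal_solve : Prop := ∀ (N : Int) (P : List Int), Dom_solve N P → Pre_solve N P → Spec_solve N P (solve N P)

-- ===== LEMMAS AND PROOFS =====

-- sign/magnitude encoding of an Int, used to prove associativity of Python xor
def pvEnc (s : Bool) (m : Nat) : Int := if s then -(m : Int) - 1 else (m : Int)

theorem pvEnc_repr (a : Int) : ∃ s m, a = pvEnc s m := by
  by_cases h : 0 ≤ a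
  · exact ⟨false, a.toNat, by simp [pvEnc]; omega⟩
  · exact ⟨true, (-a - 1).toNat, by simp [pvEnc]; omega⟩

theorem pvEnc_bxor (s t : Bool) (m n : Nat) :
    PySem.Int.bxor (pvEnc s m) (pvEnc t n) = pvEnc (Bool.xor s t) (m ^^^ n) := by
  cases s <;> cases t <;>
    simp only [pvEnc, PySem.Int.bxor, Bool.xor_false, Bool.xor_true, Bool.false_eq_true,
      ite_true, ite_false]
  · rw [if_pos (Int.natCast_nonneg m), if_pos (Int.natCast_nonneg n)]; simp
  · rw [if_pos (Int.natCast_nonneg m), if_neg (show ¬(0:Int) ≤ -(n:Int) - 1 by omega)]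
    rw [show (-(-(n:Int) - 1) - 1) = (n : Int) by ring]; simp
  · rw [if_neg (show ¬(0:Int) ≤ -(m:Int) - 1 by omega), if_pos (Int.natCast_nonneg n)]
    rw [show (-(-(m:Int) - 1) - 1) = (m : Int) by ring]; simp
  · rw [if_neg (show ¬(0:Int) ≤ -(m:Int) - 1 by omega),
        if_neg (show ¬(0:Int) ≤ -(n:Int) - 1 by omega)]
    rw [show (-(-(m:Int) - 1) - 1) = (m : Int) by ring,
        show (-(-(n:Int) - 1) - 1) = (n : Int) by ring]; simp

theorem pv_bxor_assoc (a b c : Int) :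
    PySem.Int.bxor (PySem.Int.bxor a b) c = PySem.Int.bxor a (PySem.Int.bxor b c) := by
  obtain ⟨sa, ma, ha⟩ := pvEnc_repr a
  obtain ⟨sb, mb, hb⟩ := pvEnc_repr b
  obtain ⟨sc, mc, hc⟩ := pvEnc_repr c
  subst ha hb hc
  rw [pvEnc_bxor, pvEnc_bxor, pvEnc_bxor, pvEnc_bxor, Bool.xor_assoc, Nat.xor_assoc]

-- A's fused loop splits into a xor fold and an all-(≤ 1) flag over the fetched values.
theorem fused_fold (P : List Int) (L : List Int) (x0 : Int) (b0 : Bool) :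
    L.foldl (fun (st : Int × Bool) i =>
        (PySem.Int.bxor st.1 ((PySem.List.pyGet? P i).getD 0),
         if 1 < (PySem.List.pyGet? P i).getD 0 then false else st.2)) (x0, b0)
      = ((L.map (fun i => (PySem.List.pyGet? P i).getD 0)).foldl (fun a p => PySem.Int.bxor a p) x0,
         b0 && (L.map (fun i => (PySem.List.pyGet? P i).getD 0)).all (fun p => decide (p ≤ 1))) := by
  induction L generalizing x0 b0 with
  | nil => simp
  | cons i L ih =>
    simp only [List.foldl_cons, List.map_cons, List.all_cons, ih]
    congr 1
    by_cases h : 1 < (PySem.List.pyGet? P i).getD 0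
    · simp [h, show ¬ (PySem.List.pyGet? P i).getD 0 ≤ 1 by omega]
    · simp [h, show (PySem.List.pyGet? P i).getD 0 ≤ 1 by omega]

-- parity of a count flips when it is incremented
theorem band_one_add_one (c : Int) :
    (PySem.Int.band (c + 1) 1 ≠ 0) ↔ ¬ (PySem.Int.band c 1 ≠ 0) := by
  rw [PySem.Int.band_one, PySem.Int.band_one,
      PySem.Int.mod_eq_emod_of_pos (by omega : (0:Int) < 2),
      PySem.Int.mod_eq_emod_of_pos (by omega : (0:Int) < 2)]
  omega

-- the odd-count xor fold commutes with xor-ing the accumulator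
theorem fold_acc_bxor (cnt : Int → Int) (l : List Int) (a v : Int) :
    l.foldl (fun a u => if PySem.Int.band (cnt u) 1 ≠ 0 then PySem.Int.bxor a u else a)
        (PySem.Int.bxor a v)
      = PySem.Int.bxor
        (l.foldl (fun a u => if PySem.Int.band (cnt u) 1 ≠ 0 then PySem.Int.bxor a u else a) a) v := by
  induction l generalizing a with
  | nil => simp
  | cons u l ih =>
    simp only [List.foldl_cons]
    by_cases h : PySem.Int.band (cnt u) 1 ≠ 0
    · simp only [if_pos h]
      rw [pv_bxor_assoc, PySem.Int.bxor_comm v u, ← pv_bxor_assoc, ih]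
    · simp only [if_neg h, ih]

-- incrementing the count of one present key toggles the odd-count xor by that key
theorem toggle (l : List Int) (v : Int) (cnt cnt' : Int → Int)
    (hnd : l.Nodup) (hv : v ∈ l)
    (hsame : ∀ u ∈ l, u ≠ v → cnt' u = cnt u) (hc : cnt' v = cnt v + 1) (a : Int) :
    l.foldl (fun a u => if PySem.Int.band (cnt' u) 1 ≠ 0 then PySem.Int.bxor a u else a) a
      = PySem.Int.bxor
        (l.foldl (fun a u => if PySem.Int.band (cnt u) 1 ≠ 0 then PySem.Int.bxor a u else a) a) v := by
  induction l generalizing a with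
  | nil => cases hv
  | cons u l ih =>
    rcases List.nodup_cons.mp hnd with ⟨hu, hnd'⟩
    simp only [List.foldl_cons]
    rcases List.mem_cons.mp hv with h | h
    · subst h
      have hrest : ∀ u ∈ l, u ≠ v → cnt' u = cnt u :=
        fun u hu' hne => hsame u (List.mem_cons_of_mem _ hu') hne
      rw [PySem.List.foldl_congr_mem l
            (fun a u => if PySem.Int.band (cnt' u) 1 ≠ 0 then PySem.Int.bxor a u else a)
            (fun a u => if PySem.Int.band (cnt u) 1 ≠ 0 then PySem.Int.bxor a u else a)
            (if PySem.Int.band (cnt' v) 1 ≠ 0 then PySem.Int.bxor a v else a)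
            (fun acc x hx => by
              have hx' : cnt' x = cnt x := hrest x hx (fun he => hu (he ▸ hx))
              simp only [hx'])]
      have hstep : (if PySem.Int.band (cnt' v) 1 ≠ 0 then PySem.Int.bxor a v else a)
          = PySem.Int.bxor (if PySem.Int.band (cnt v) 1 ≠ 0 then PySem.Int.bxor a v else a) v := by
        by_cases hp : PySem.Int.band (cnt v) 1 ≠ 0
        · rw [if_pos hp, if_neg (fun h => ((band_one_add_one (cnt v)).mp (hc ▸ h)) hp)]
          rw [pv_bxor_assoc, PySem.Int.bxor_self, PySem.Int.bxor_zero]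
        · rw [if_neg hp, if_pos (by rw [hc]; exact (band_one_add_one (cnt v)).mpr hp)]
      rw [hstep, fold_acc_bxor]
    · have hne : u ≠ v := fun he => hu (he ▸ h)
      rw [hsame u (List.mem_cons_self) hne]
      exact ih hnd' h (fun w hw hwne => hsame w (List.mem_cons_of_mem _ hw) hwne) _

-- the histogram xor (over distinct values of odd multiplicity) is the plain xor fold
theorem xor_key (xs : List Int) :
    (PySem.Set.ofList xs).foldl
        (fun a k => if PySem.Int.band ((xs.count k : Nat) : Int) 1 ≠ 0 then PySem.Int.bxor a k else a) 0
      = xs.foldl (fun a p => PySem.Int.bxor a p) 0 := by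
  induction xs using List.reverseRecOn with
  | nil => simp [PySem.Set.ofList]
  | append_singleton xs v ih =>
    rw [PySem.Set.ofList_append_singleton, List.foldl_append, List.foldl_cons, List.foldl_nil]
    by_cases hv : v ∈ xs
    · rw [PySem.Set.add_of_mem ((PySem.Set.mem_ofList xs v).mpr hv)]
      rw [toggle (PySem.Set.ofList xs) v
            (fun k => ((xs.count k : Nat) : Int)) (fun k => (((xs ++ [v]).count k : Nat) : Int))
            (PySem.Set.nodup_ofList xs) ((PySem.Set.mem_ofList xs v).mpr hv)
            (fun u _ hne => by
              have h0 : (xs ++ [v]).count u = xs.count u := by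
                simp [List.count_append, Ne.symm hne]
              simp only [h0])
            (by
              have h1 : (xs ++ [v]).count v = xs.count v + 1 := by
                simp [List.count_append]
              simp only [h1]; push_cast; ring) 0, ih]
    · rw [PySem.Set.add_of_not_mem (fun h => hv ((PySem.Set.mem_ofList xs v).mp h)), List.foldl_append]
      rw [PySem.List.foldl_congr_mem (PySem.Set.ofList xs)
            (fun a k => if PySem.Int.band (((xs ++ [v]).count k : Nat) : Int) 1 ≠ 0 then PySem.Int.bxor a k else a)
            (fun a k => if PySem.Int.band ((xs.count k : Nat) : Int) 1 ≠ 0 then PySem.Int.bxor a k else a)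
            0
            (fun acc x hx => by
              have hxv : x ≠ v := fun he => hv (he ▸ (PySem.Set.mem_ofList xs x).mp hx)
              have h0 : (xs ++ [v]).count x = xs.count x := by
                simp [List.count_append, Ne.symm hxv]
              simp only [h0]), ih]
      have hc1 : (xs ++ [v]).count v = 1 := by
        simp [List.count_append, List.count_eq_zero.mpr hv]
      simp only [List.foldl_cons, List.foldl_nil, hc1, Nat.cast_one]
      rw [if_pos (by decide : PySem.Int.band (1:Int) 1 ≠ 0)]

-- any over the deduplicated value set is any over the values
theorem set_any (xs : List Int) (p : Int → Bool) :
    (PySem.Set.ofList xs).any p = xs.any p := by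
  rw [Bool.eq_iff_iff]
  simp only [List.any_eq_true]
  constructor
  · rintro ⟨x, hx, hp⟩; exact ⟨x, (PySem.Set.mem_ofList xs x).mp hx, hp⟩
  · rintro ⟨x, hx, hp⟩; exact ⟨x, (PySem.Set.mem_ofList xs x).mpr hx, hp⟩

-- all (≤ 1) is the negation of any (> 1)
theorem all_not_any (xs : List Int) :
    xs.all (fun p => decide (p ≤ 1)) = !(xs.any (fun v => decide (1 < v))) := by
  rw [Bool.eq_iff_iff]
  simp only [List.all_eq_true, Bool.not_eq_eq_eq_not, Bool.not_true, List.any_eq_false]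
  constructor
  · intro h v hv; simpa using h v hv
  · intro h v hv; simpa using h v hv

-- ===== VERDICT (by name: the statement is the Claim_ definition above) =====
theorem solve_spec : Claim_equal_solve := by
  intro N P _ _
  unfold Spec_solve
  simp only [solve, solve_alt]
  rw [fused_fold P (PySem.List.pyRange 0 N 1) 0 true]
  rw [show (PySem.List.pyRange 0 N 1).foldl
        (fun (d : PySem.Dict Int Int) i =>
          d.insert ((PySem.List.pyGet? P i).getD 0)
            (d.getD ((PySem.List.pyGet? P i).getD 0) 0 + 1)) PySem.Dict.empty
      = ((PySem.List.pyRange 0 N 1).map (fun i => (PySem.List.pyGet? P i).getD 0)).foldl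
          (fun d v => d.insert v (d.getD v 0 + 1)) PySem.Dict.empty from by
        rw [List.foldl_map]]
  rw [PySem.Dict.foldl_insert_getD_add_one_eq_counter]
  generalize (PySem.List.pyRange 0 N 1).map (fun i => (PySem.List.pyGet? P i).getD 0) = vals
  rw [PySem.Dict.items_counter, PySem.Dict.keys_counter]
  rw [List.foldl_map]
  dsimp only
  rw [xor_key vals, set_any vals, all_not_any vals]
  generalize vals.foldl (fun a p => PySem.Int.bxor a p) 0 = x
  generalize vals.any (fun v => decide (1 < v)) = b
  cases b <;> cases hx : (x == 0) <;> simp [bne, hx]
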